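-- pv_equiv track=rewrite | github.com/Sulynn7/Python_Practice | 9. Text Files/9.3 Wandering fingers.py | issubword
-- ===== SOURCE A (Python) =====
-- def issubword(subword, letter):
--     """
--     >>> issubword('quick', 'qwertyuihgfcvbnhjk')
--     True
--     >>> issubword('win', 'qwertyuytresdftyuiokn')
--     True
--     >>> issubword('queen', 'qwertyuytresdftyuiokn')
--     True
--     >>> issubword('quick', 'qwertyuytresdftyuiokn')
--     False
--     """
--     list1 = []
--
--     c = 0
--     for i, a in enumerate(letter):
--         while True:
--             if c < len(subword):
--                 if a == subword[c]:
--                     list1.append(i)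
--                     c += 1
--                 else:
--                     break
--             else:
--                 break
--
--     for b in subword:
--         if b not in letter:
--             return False
--     if len(list1) != len(subword):
--         return False
--     elif list1 == sorted(list1):
--         return True
--     else:
--         return False
-- ===== SOURCE B (Python) =====
-- def issubword(subword, letter):
--     # collapse consecutive duplicate characters of subword into the list of run heads
--     runs = []
--     for ch in subword:
--         if not runs or runs[-1] != ch:
--             runs.append(ch)
--     # single greedy pass over letter (a letter char that matches consumes the whole run)
--     j = 0
--     for a in letter:
--         if j < len(runs) and a == runs[j]:
--             j += 1
--     return j == len(runs)
-- ===== Notes on version B (the rewrite author's own statement) =====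
-- stated objective: alternative
-- what changed: B collapses consecutive duplicate chars of subword into a run list once and does a single greedy two-pointer pass over letter (replicating A's one-letter-char-matches-a-whole-run behaviour), dropping A's per-char while-loop state machine, the membership scan of letter and the sorted() self-check.
import Mathlib
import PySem

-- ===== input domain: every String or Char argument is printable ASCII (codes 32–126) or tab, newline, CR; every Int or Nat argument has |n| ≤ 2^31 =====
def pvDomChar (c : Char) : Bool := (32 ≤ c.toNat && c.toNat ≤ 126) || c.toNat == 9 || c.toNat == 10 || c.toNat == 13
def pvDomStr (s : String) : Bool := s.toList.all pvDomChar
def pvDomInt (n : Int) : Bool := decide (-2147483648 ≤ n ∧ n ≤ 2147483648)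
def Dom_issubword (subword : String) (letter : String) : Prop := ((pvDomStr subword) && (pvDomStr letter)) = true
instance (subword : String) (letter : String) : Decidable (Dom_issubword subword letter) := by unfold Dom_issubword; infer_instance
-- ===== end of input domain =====

-- B collapses subword's consecutive duplicates into runs once, then one greedy pass over letter,
-- dropping A's membership pass and sorted() self-check (objective: alternative algorithm).

-- ===== PORT A =====
-- the inner 'while True' of A: advances c through subword while letter-char a keeps matching, appending i
def pvWhileA (sub : List Char) (a : Char) (i : Int) (c : Nat) (acc : List Int) : Nat × List Int :=
  if h : c < sub.length then
    if a = sub[c] then pvWhileA sub a i (c + 1) (acc ++ [i]) else (c, acc)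
  else (c, acc)
termination_by sub.length - c

def issubword (subword : String) (letter : String) : Bool :=
  let sub := subword.toList
  let lt := letter.toList
  let st := (PySem.List.enumerate lt 0).foldl
      (fun (st : Nat × List Int) (p : Int × Char) => pvWhileA sub p.2 p.1 st.1 st.2) (0, [])
  -- 'b not in letter' is a 1-char substring test
  if sub.any (fun b => !(PySem.Chars.isIn [b] lt)) then false
  else if st.2.length ≠ sub.length then false
  else if st.2 = PySem.List.sorted st.2 (fun x => x) false then true
  else false

-- ===== PORT B =====
def issubword_alt (subword : String) (letter : String) : Bool :=
  -- runs: consecutive duplicate characters of subword collapsed ('if not runs or runs[-1] != ch: runs.append(ch)')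
  let runs := subword.toList.foldl
      (fun (acc : List Char) (ch : Char) => if acc = [] ∨ acc.getLast? ≠ some ch then acc ++ [ch] else acc) []
  -- greedy two-pointer pass; 'runs[j]? = some a' encodes 'j < len(runs) and a == runs[j]'
  let j := letter.toList.foldl (fun (j : Nat) (a : Char) => if runs[j]? = some a then j + 1 else j) 0
  decide (j = runs.length)

-- ===== PRECONDITION & SPEC =====
def Spec_issubword (subword : String) (letter : String) (out : Bool) : Prop := out = issubword_alt subword letter
instance (subword : String) (letter : String) (out : Bool) : Decidable (Spec_issubword subword letter out) := by unfold Spec_issubword; infer_instance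

-- ===== CLAIM (what is proved, stated in full; the proofs are below) =====
def Claim_equal_issubword : Prop := ∀ (subword : String) (letter : String), Dom_issubword subword letter → Spec_issubword subword letter (issubword subword letter)

-- ===== LEMMAS AND PROOFS =====

-- runsFrom last s: s with consecutive duplicates collapsed, knowing the previously emitted char
def runsFrom : Option Char → List Char → List Char
  | _, [] => []
  | last, c :: t => if last = some c then runsFrom last t else c :: runsFrom (some c) t

-- B's runs-building foldl computes runsFrom
lemma runsLoop_eq : ∀ (s acc : List Char),
    s.foldl (fun (acc : List Char) (ch : Char) => if acc = [] ∨ acc.getLast? ≠ some ch then acc ++ [ch] else acc) acc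
      = acc ++ runsFrom acc.getLast? s := by
  intro s
  induction s with
  | nil => simp [runsFrom]
  | cons c t ih =>
    intro acc
    by_cases hl : acc.getLast? = some c
    · have hne : acc ≠ [] := by intro h; simp [h] at hl
      simp only [List.foldl_cons, hne, hl, runsFrom]
      simp [ih, hl]
    · simp only [List.foldl_cons, runsFrom, hl]
      have : (acc = [] ∨ acc.getLast? ≠ some c) := Or.inr hl
      simp only [if_pos this, ih]
      simp [List.getLast?_append]

lemma runsFrom_some (h : Char) : ∀ (t : List Char),
    runsFrom (some h) t = runsFrom none (t.dropWhile (· = h)) := by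
  intro t
  induction t with
  | nil => rfl
  | cons d t' ih =>
    by_cases hd : h = d
    · subst hd; simpa [runsFrom] using ih
    · have : ¬ (d = h) := fun e => hd e.symm
      simp [runsFrom, hd, this]

lemma dropWhile_eq_drop (p : Char → Bool) (l : List Char) :
    l.dropWhile p = l.drop (l.takeWhile p).length := by
  induction l with
  | nil => rfl
  | cons h t ih => by_cases hp : p h <;> simp [List.takeWhile_cons, hp, ih]

lemma isChain_replicate (t : Nat) (k : Int) : List.IsChain (· ≤ ·) (List.replicate t k) := by
  induction t with
  | zero => simp
  | succ n ih => cases n <;> simp_all [List.replicate_succ, List.isChain_cons]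

-- characterization of A's inner while loop
lemma whileA_eq (sub : List Char) (a : Char) (i : Int) : ∀ (c : Nat) (acc : List Int),
    pvWhileA sub a i c acc =
      (c + ((sub.drop c).takeWhile (fun x => a = x)).length,
       acc ++ List.replicate ((sub.drop c).takeWhile (fun x => a = x)).length i) := by
  intro c
  induction hn : sub.length - c using Nat.strong_induction_on generalizing c with
  | _ n ih =>
    intro acc
    by_cases h : c < sub.length
    · have hdrop : sub.drop c = sub[c] :: sub.drop (c + 1) := List.drop_eq_getElem_cons h
      by_cases ha : a = sub[c]
      · rw [pvWhileA, dif_pos h, if_pos ha]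
        rw [ih _ (by omega) (c + 1) rfl, hdrop]
        have hd : decide (a = sub[c]) = true := by simp [ha]
        simp only [List.takeWhile_cons, hd, if_pos, List.length_cons, List.replicate_succ]
        
        refine Prod.ext ?_ ?_
        · simp; omega
        · simp
      · rw [pvWhileA, dif_pos h, if_neg ha]
        rw [hdrop]
        have hd : decide (a = sub[c]) = false := by simp [ha]
        simp [List.takeWhile_cons, hd]
    · rw [pvWhileA]
      simp [h, List.drop_eq_nil_of_le (by omega : sub.length ≤ c)]

-- abbreviations for the two folds (definitionally the loops of the ports)
def foldA (sub : List Char) (ps : List (Int × Char)) (st : Nat × List Int) : Nat × List Int :=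
  ps.foldl (fun (st : Nat × List Int) (p : Int × Char) => pvWhileA sub p.2 p.1 st.1 st.2) st

def foldB (runs : List Char) (L : List Char) (j : Nat) : Nat :=
  L.foldl (fun (j : Nat) (a : Char) => if runs[j]? = some a then j + 1 else j) j

lemma foldA_cons (sub : List Char) (p : Int × Char) (ps : List (Int × Char)) (st : Nat × List Int) :
    foldA sub (p :: ps) st = foldA sub ps (pvWhileA sub p.2 p.1 st.1 st.2) := rfl

lemma foldB_cons (runs : List Char) (a : Char) (L : List Char) (j : Nat) :
    foldB runs (a :: L) j = foldB runs L (if runs[j]? = some a then j + 1 else j) := rfl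

lemma dropWhile_congr (p q : Char → Bool) (l : List Char) (h : ∀ x ∈ l, p x = q x) :
    l.dropWhile p = l.dropWhile q := by
  induction l with
  | nil => rfl
  | cons a t ih => simp only [List.dropWhile_cons, h a (by simp)]; split <;> simp_all

-- the elements produced by takeWhile (a = ·) are all a
lemma takeWhile_mem_eq (a : Char) (l : List Char) :
    ∀ x ∈ l.takeWhile (fun x => a = x), x = a := by
  intro x hx
  have := List.mem_takeWhile_imp hx
  simpa [eq_comm] using of_decide_eq_true this

-- main loop invariant: A's (c, list1) fold and B's j fold stay related
lemma main_inv (sub : List Char) : ∀ (L : List Char) (k : Int) (c : Nat) (acc : List Int) (j : Nat),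
    c ≤ sub.length →
    acc.length = c →
    List.IsChain (· ≤ ·) acc →
    (∀ x ∈ acc, x < k) →
    runsFrom none (sub.drop c) = (runsFrom none sub).drop j →
    j ≤ (runsFrom none sub).length →
    (foldA sub (PySem.List.enumerate L k) (c, acc)).1 ≤ sub.length ∧
    (foldA sub (PySem.List.enumerate L k) (c, acc)).2.length = (foldA sub (PySem.List.enumerate L k) (c, acc)).1 ∧
    List.IsChain (· ≤ ·) (foldA sub (PySem.List.enumerate L k) (c, acc)).2 ∧
    (∀ x ∈ (foldA sub (PySem.List.enumerate L k) (c, acc)).2, x < k + L.length) ∧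
    runsFrom none (sub.drop (foldA sub (PySem.List.enumerate L k) (c, acc)).1)
      = (runsFrom none sub).drop (foldB (runsFrom none sub) L j) ∧
    foldB (runsFrom none sub) L j ≤ (runsFrom none sub).length ∧
    (∀ m, c ≤ m → m < (foldA sub (PySem.List.enumerate L k) (c, acc)).1 →
       ∀ x, sub[m]? = some x → x ∈ L) := by
  intro L
  induction L with
  | nil =>
    intro k c acc j hc hlen hchain hb hruns hj
    simp only [PySem.List.enumerate_nil, foldA, foldB, List.foldl_nil]
    refine ⟨hc, hlen, hchain, ?_, hruns, hj, ?_⟩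
    · intro x hx; have := hb x hx; simpa using this.trans_le (by omega)
    · intro m h1 h2; omega
  | cons a rest ih =>
    intro k c acc j hc hlen hchain hb hruns hj
    rw [PySem.List.enumerate_cons, foldA_cons, foldB_cons]
    simp only
    set R := runsFrom none sub with hR
    set t := ((sub.drop c).takeWhile (fun x => a = x)).length with ht
    set acc1 := acc ++ List.replicate t k with hacc1
    have hstep : pvWhileA sub a k c acc = (c + t, acc1) := whileA_eq sub a k c acc
    rw [hstep]
    set j1 := (if R[j]? = some a then j + 1 else j) with hj1
    -- the new state satisfies the invariant
    have hrem : (sub.drop c).takeWhile (fun x => a = x) <+: sub.drop c := List.takeWhile_prefix _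
    have h1 : c + t ≤ sub.length := by
      have := hrem.sublist.length_le
      rw [List.length_drop] at this
      omega
    have h2 : acc1.length = c + t := by simp [hacc1, hlen]
    have h3 : List.IsChain (· ≤ ·) acc1 := by
      rw [hacc1, List.isChain_append]
      refine ⟨hchain, isChain_replicate t k, ?_⟩
      intro x hx y hy
      have hxa : x ∈ acc := List.mem_of_getLast? hx
      have hyk : y = k := List.eq_of_mem_replicate (List.mem_of_mem_head? hy)
      have := hb x hxa
      omega
    have h4 : ∀ x ∈ acc1, x < k + 1 := by
      intro x hx
      rcases List.mem_append.mp hx with h | h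
      · have := hb x h; omega
      · have := List.eq_of_mem_replicate h; omega
    have hdd : sub.drop (c + t) = (sub.drop c).dropWhile (fun x => decide (a = x)) := by
      rw [dropWhile_eq_drop, ← ht, List.drop_drop, Nat.add_comm]
    have h56 : runsFrom none (sub.drop (c + t)) = R.drop j1 ∧ j1 ≤ R.length := by
      rcases hcase : sub.drop c with _ | ⟨h, tail⟩
      · -- subword exhausted: nothing matches, nothing changes
        have ht0 : t = 0 := by simp [ht, hcase]
        have hdj : R.drop j = [] := by rw [← hruns, hcase]; rfl
        have hjlen : R.length ≤ j := List.drop_eq_nil_iff.mp hdj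
        have hnone : R[j]? = none := List.getElem?_eq_none hjlen
        have : j1 = j := by simp [hj1, hnone]
        rw [this, ht0]
        exact ⟨by rw [Nat.add_zero, hruns], hj⟩
      · have hcons : runsFrom none (h :: tail) = h :: runsFrom (some h) tail := by
          simp [runsFrom]
        have hdj : R.drop j = h :: runsFrom (some h) tail := by
          rw [← hruns, hcase, hcons]
        have hget : R[j]? = some h := by
          have : (R.drop j)[0]? = R[j]? := by rw [List.getElem?_drop]; simp
          rw [← this, hdj]; rfl
        by_cases hah : a = h
        · subst hah
          have hj1v : j1 = j + 1 := by simp [hj1, hget]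
          have hdw : (sub.drop c).dropWhile (fun x => decide (a = x))
              = tail.dropWhile (fun x => decide (x = a)) := by
            rw [hcase, List.dropWhile_cons]
            simp only [decide_eq_true_eq, if_pos rfl]
            exact dropWhile_congr _ _ tail (fun x _ => by simp [eq_comm])
          constructor
          · rw [hdd, hdw, ← runsFrom_some, hj1v, ← List.tail_drop, hdj]; rfl
          · have : ¬ R.length ≤ j := fun hle => by simp [List.drop_eq_nil_iff.mpr hle] at hdj
            omega
        · have hj1v : j1 = j := by
            have : R[j]? ≠ some a := by rw [hget]; simp [Ne.symm hah]
            simp [hj1, this]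
          have ht0 : t = 0 := by
            rw [ht, hcase, List.takeWhile_cons]
            simp [hah]
          rw [hj1v, ht0]
          exact ⟨by rw [Nat.add_zero, hruns], hj⟩
    obtain ⟨g1, g2, g3, g4, g5, g6, g7⟩ := ih (k + 1) (c + t) acc1 j1 h1 h2 h3 h4 h56.1 h56.2
    refine ⟨g1, g2, g3, ?_, g5, g6, ?_⟩
    · intro x hx
      have := g4 x hx
      simp only [List.length_cons]
      push_cast at this ⊢
      omega
    · intro m hm1 hm2 x hxm
      by_cases hmt : m < c + t
      · -- index consumed by this letter char: the matched char is a itself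
        have hxa : x = a := by
          have hgd : (sub.drop c)[m - c]? = some x := by
            rw [List.getElem?_drop, show c + (m - c) = m by omega, hxm]
          obtain ⟨tl, heq⟩ := hrem
          have hlt' : m - c < t := by omega
          have : ((sub.drop c).takeWhile (fun x => a = x))[m - c]? = some x := by
            rw [← List.getElem?_append_left (ht ▸ hlt'), heq, hgd]
          exact takeWhile_mem_eq a _ x (List.mem_of_getElem? this)
        rw [hxa]; exact List.mem_cons_self
      · exact List.mem_cons_of_mem a (g7 m (by omega) hm2 x hxm)

-- final assembly
lemma issubword_eq_alt (subword letter : String) :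
    issubword subword letter = issubword_alt subword letter := by
  set sub := subword.toList with hsub
  set lt := letter.toList with hlt
  obtain ⟨hc, hlen, hchain, -, hruns, hj, hmem⟩ :=
    main_inv sub lt 0 0 [] 0 (Nat.zero_le _) rfl (by simp) (by simp) (by simp) (Nat.zero_le _)
  set st := foldA sub (PySem.List.enumerate lt 0) (0, []) with hst
  set R := runsFrom none sub with hR
  set j' := foldB R lt 0 with hj'
  have hA : issubword subword letter =
      (if sub.any (fun b => !(PySem.Chars.isIn [b] lt)) then false
       else if st.2.length ≠ sub.length then false
       else if st.2 = PySem.List.sorted st.2 (fun x => x) false then true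
       else false) := rfl
  have hBrun : sub.foldl
      (fun (acc : List Char) (ch : Char) => if acc = [] ∨ acc.getLast? ≠ some ch then acc ++ [ch] else acc) []
      = R := by simpa using runsLoop_eq sub []
  have hB : issubword_alt subword letter = decide (j' = R.length) := by
    show decide (foldB _ lt 0 = _) = _
    rw [hBrun]
  rw [hA, hB]
  by_cases hcn : st.1 = sub.length
  · -- every subword char was matched: both sides are true
    have hjR : j' = R.length := by
      have : R.drop j' = [] := by rw [← hruns, hcn, List.drop_length]; rfl
      have := List.drop_eq_nil_iff.mp this
      omega
    have hany : sub.any (fun b => !(PySem.Chars.isIn [b] lt)) = false := by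
      simp only [List.any_eq_false, Bool.not_eq_true', Bool.not_eq_false]
      intro b hb
      obtain ⟨i, hi, rfl⟩ := List.getElem_of_mem hb
      have hmemb : sub[i] ∈ lt :=
        hmem i (Nat.zero_le _) (by omega) _ (List.getElem?_eq_getElem hi)
      rw [PySem.Chars.isIn_iff_infix]
      exact (List.singleton_infix_iff _ _).mpr hmemb
    have hsorted : st.2 = PySem.List.sorted st.2 (fun x => x) false := by
      have hp : st.2.Pairwise (fun a b => a ≤ b) := List.isChain_iff_pairwise.mp hchain
      exact (PySem.List.sorted_eq_self_of_pairwise st.2 (fun x => x) hp).symm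
    rw [hany]
    simp [hlen, hcn, hsorted.symm, hjR]
  · -- subword not exhausted: both sides are false
    have hjR : j' ≠ R.length := by
      intro he
      have hdrop : runsFrom none (sub.drop st.1) = [] := by
        rw [hruns, he, List.drop_length]
      rcases hdc : sub.drop st.1 with - | ⟨h, t⟩
      · have := List.drop_eq_nil_iff.mp hdc; omega
      · rw [hdc] at hdrop; simp [runsFrom] at hdrop
    have hlf : (st.2.length ≠ sub.length) := by rw [hlen]; exact hcn
    have hd : decide (j' = R.length) = false := by simp [hjR]
    rw [hd]
    split_ifs with h1 h2 h3 <;> rfl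

-- ===== VERDICT (by name: the statement is the Claim_ definition above) =====
theorem issubword_spec : Claim_equal_issubword := by
  intro subword letter _
  unfold Spec_issubword
  exact issubword_eq_alt subword letter
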